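-- pv_equiv track=rewrite | github.com/jdelvalle2002/IPRE-IRP | codigo_chiu_adaptado.py | calculate_total_daily_deliveries
-- ===== SOURCE A (Python) =====
-- def calculate_total_daily_deliveries(daily_deliveries_amount):
--
--     total_daily_deliveries = {}
--
--     for customer, deliveries in daily_deliveries_amount.items():
--         for day, amount in enumerate(deliveries):
--             if day in total_daily_deliveries:
--                 total_daily_deliveries[day] += amount
--             else:
--                 total_daily_deliveries[day] = amount
--
--     return total_daily_deliveries
-- ===== SOURCE B (Python) =====
-- def calculate_total_daily_deliveries(daily_deliveries_amount):
--     # Pivot: sum each day's column across all customers' delivery lists.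
--     rows = list(daily_deliveries_amount.values())
--     width = max(map(len, rows), default=0)
--     return {day: sum(row[day] for row in rows if day < len(row))
--             for day in range(width)}
-- ===== Notes on version B (the rewrite author's own statement) =====
-- stated objective: alternative
-- what changed: B pivots the data: it computes each day's total as the column sum over all customers' rows for day in range(max length), instead of A's scatter-accumulation into a dict updated per (customer, day).
import Mathlib
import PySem

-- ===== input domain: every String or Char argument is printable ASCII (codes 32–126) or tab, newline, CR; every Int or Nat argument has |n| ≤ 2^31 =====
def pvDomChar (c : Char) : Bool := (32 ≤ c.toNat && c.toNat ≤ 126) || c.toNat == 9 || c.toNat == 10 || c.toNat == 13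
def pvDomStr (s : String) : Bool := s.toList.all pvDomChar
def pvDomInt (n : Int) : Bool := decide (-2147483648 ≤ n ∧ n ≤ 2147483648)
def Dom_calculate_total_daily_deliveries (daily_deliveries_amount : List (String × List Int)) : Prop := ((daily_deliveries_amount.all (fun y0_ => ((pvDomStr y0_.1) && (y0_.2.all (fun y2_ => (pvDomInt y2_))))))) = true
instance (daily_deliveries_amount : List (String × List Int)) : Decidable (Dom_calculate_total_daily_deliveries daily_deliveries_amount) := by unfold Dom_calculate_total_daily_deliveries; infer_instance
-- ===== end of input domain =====

-- B pivots to per-day column sums instead of A's scatter-accumulation dict; exact equivalence, no speed claim.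

-- ===== PORT A =====
def calculate_total_daily_deliveries (daily_deliveries_amount : List (String × List Int)) : List (Int × Int) :=
  -- total_daily_deliveries = {}; nested for-loops; 'day in dict' test; return the dict (as items)
  (daily_deliveries_amount.foldl (fun td pair =>
    (PySem.List.enumerate pair.2 0).foldl (fun td' da =>
      if td'.contains da.1 then td'.insert da.1 (td'.getD da.1 0 + da.2)
      else td'.insert da.1 da.2) td)
    (PySem.Dict.empty : PySem.Dict Int Int)).items

-- ===== PORT B =====
def calculate_total_daily_deliveries_alt (daily_deliveries_amount : List (String × List Int)) : List (Int × Int) :=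
  -- rows = list(values); width = max(map(len, rows), default=0);
  -- {day: sum(row[day] for row in rows if day < len(row)) for day in range(width)}
  let rows := daily_deliveries_amount.map (·.2)
  let width : Int := rows.foldl (fun m r => max m (r.length : Int)) 0
  (PySem.List.pyRange 0 width 1).map (fun day =>
    (day, rows.foldl (fun s r => if day < (r.length : Int) then s + PySem.List.pyGetD r day 0 else s) 0))

-- ===== PRECONDITION & SPEC =====
def Spec_calculate_total_daily_deliveries (daily_deliveries_amount : List (String × List Int)) (out : List (Int × Int)) : Prop := out = calculate_total_daily_deliveries_alt daily_deliveries_amount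
instance (daily_deliveries_amount : List (String × List Int)) (out : List (Int × Int)) : Decidable (Spec_calculate_total_daily_deliveries daily_deliveries_amount out) := by unfold Spec_calculate_total_daily_deliveries; infer_instance

-- ===== CLAIM (what is proved, stated in full; the proofs are below) =====
def Claim_equal_calculate_total_daily_deliveries : Prop := ∀ (daily_deliveries_amount : List (String × List Int)), Dom_calculate_total_daily_deliveries daily_deliveries_amount → Spec_calculate_total_daily_deliveries daily_deliveries_amount (calculate_total_daily_deliveries daily_deliveries_amount)

-- ===== LEMMAS AND PROOFS =====

-- canonical form: list of (day, column sum) for day < max row length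
def pvColSum (rows : List (List Int)) (i : Nat) : Int := (rows.map (fun r => r.getD i 0)).sum
def pvMaxw (rows : List (List Int)) : Nat := rows.foldl (fun m r => max m r.length) 0
def pvRangeList (w : Nat) : List Int := (List.range w).map (fun i : Nat => (i : Int))

-- the accumulation step of A, with the two branches unified
theorem step_eq (td : PySem.Dict Int Int) (da : Int × Int) :
    (if td.contains da.1 then td.insert da.1 (td.getD da.1 0 + da.2)
     else td.insert da.1 da.2) = td.insert da.1 (td.getD da.1 0 + da.2) := by
  by_cases h : td.contains da.1 = true
  · rw [if_pos h]
  · rw [if_neg h, PySem.Dict.getD_of_not_contains _ _ (by simpa using h), zero_add]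

def pvStep (dd : PySem.Dict Int Int) (p : Int × Int) : PySem.Dict Int Int :=
  dd.insert p.1 (dd.getD p.1 0 + p.2)

-- a fold of folds is a fold over the flatMap
theorem foldl_foldl {α β γ : Type} (f : γ → β → γ) (g : α → List β) :
    ∀ (l : List α) (init : γ),
      l.foldl (fun acc x => (g x).foldl f acc) init = (l.flatMap g).foldl f init := by
  intro l
  induction l with
  | nil => intro init; rfl
  | cons x l ih =>
    intro init
    simp only [List.foldl_cons, List.flatMap_cons, List.foldl_append, ih]

theorem getD_fold : ∀ (l : List (Int × Int)) (dct : PySem.Dict Int Int) (k : Int),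
    (l.foldl pvStep dct).getD k 0
      = dct.getD k 0 + ((l.filter (fun p => p.1 == k)).map (·.2)).sum := by
  intro l
  induction l with
  | nil => intro dct k; simp
  | cons p l ih =>
    intro dct k
    simp only [List.foldl_cons, ih, List.filter_cons]
    by_cases h : p.1 = k
    · rw [if_pos (by simpa using h), List.map_cons, List.sum_cons,
         pvStep, PySem.Dict.getD_insert, if_pos h.symm, h]
      ring
    · rw [if_neg (by simpa using h),
         pvStep, PySem.Dict.getD_insert, if_neg (fun hk => h hk.symm)]

theorem mem_rangeList (w : Nat) (x : Int) : x ∈ pvRangeList w ↔ 0 ≤ x ∧ x < (w : Int) := by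
  unfold pvRangeList
  rw [List.mem_map]
  constructor
  · rintro ⟨i, hi, rfl⟩
    rw [List.mem_range] at hi
    omega
  · rintro ⟨h0, hw⟩
    exact ⟨x.toNat, List.mem_range.2 (by omega), by omega⟩

theorem rangeList_succ (w : Nat) : pvRangeList (w + 1) = pvRangeList w ++ [(w : Int)] := by
  simp [pvRangeList, List.range_succ]

theorem update_rangeList : ∀ (n w : Nat),
    PySem.Set.update (pvRangeList w) (pvRangeList n) = pvRangeList (max w n) := by
  intro n
  induction n with
  | zero => intro w; simp [pvRangeList, PySem.Set.update]
  | succ n ih =>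
    intro w
    rw [rangeList_succ, PySem.Set.update, List.foldl_append]
    have hfold : List.foldl PySem.Set.add (pvRangeList w) (pvRangeList n)
        = PySem.Set.update (pvRangeList w) (pvRangeList n) := rfl
    rw [hfold, ih]
    have hadd : List.foldl PySem.Set.add (pvRangeList (max w n)) [(n : Int)]
        = PySem.Set.add (pvRangeList (max w n)) (n : Int) := rfl
    rw [hadd]
    by_cases h : n < max w n
    · have hc : PySem.Set.contains (pvRangeList (max w n)) (n : Int) = true := by
        simp only [PySem.Set.contains, List.contains_eq_mem, decide_eq_true_eq]
        exact (mem_rangeList _ _).2 ⟨by omega, by exact_mod_cast h⟩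
      rw [PySem.Set.add, if_pos hc]
      congr 1
      omega
    · have hm : max w n = n := by omega
      have hc : PySem.Set.contains (pvRangeList (max w n)) (n : Int) = false := by
        simp only [PySem.Set.contains, List.contains_eq_mem, decide_eq_false_iff_not]
        rw [mem_rangeList]
        omega
      rw [PySem.Set.add, if_neg (by rw [hc]; simp), hm,
          show max w (n + 1) = n + 1 by omega, rangeList_succ]

theorem update_flatMap {α : Type} (g : α → List Int) : ∀ (l : List α) (s : PySem.Set Int),
    PySem.Set.update s (l.flatMap g) = l.foldl (fun s r => PySem.Set.update s (g r)) s := by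
  intro l
  induction l with
  | nil => intro s; rfl
  | cons x l ih =>
    intro s
    rw [List.flatMap_cons, PySem.Set.update, List.foldl_append, List.foldl_cons]
    rw [show List.foldl PySem.Set.add s (g x) = PySem.Set.update s (g x) from rfl,
        show List.foldl PySem.Set.add (PySem.Set.update s (g x)) (l.flatMap g)
          = PySem.Set.update (PySem.Set.update s (g x)) (l.flatMap g) from rfl, ih]

theorem keys_rangeList : ∀ (rows : List (List Int)) (w : Nat),
    rows.foldl (fun s r => PySem.Set.update s (pvRangeList r.length)) (pvRangeList w)
      = pvRangeList (rows.foldl (fun m r => max m r.length) w) := by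
  intro rows
  induction rows with
  | nil => intro w; rfl
  | cons r rows ih =>
    intro w
    rw [List.foldl_cons, List.foldl_cons, update_rangeList, ih]

theorem sum_flatMap' {α : Type} (g : α → List Int) : ∀ (l : List α),
    (l.flatMap g).sum = (l.map (fun a => (g a).sum)).sum := by
  intro l
  induction l with
  | nil => rfl
  | cons x l ih => simp [List.flatMap_cons, ih]

theorem enum_filter_sum : ∀ (r : List Int) (s : Int) (i : Nat),
    (((PySem.List.enumerate r s).filter (fun p => p.1 == s + (i : Int))).map (·.2)).sum
      = r.getD i 0 := by
  intro r
  induction r with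
  | nil => intro s i; simp [PySem.List.enumerate_nil]
  | cons a r ih =>
    intro s i
    rw [PySem.List.enumerate_cons, List.filter_cons]
    cases i with
    | zero =>
      rw [if_pos (by simp)]
      have htail : (PySem.List.enumerate r (s + 1)).filter (fun p => p.1 == s + ((0 : Nat) : Int)) = [] := by
        rw [List.filter_eq_nil_iff]
        intro p hp
        rcases (PySem.List.mem_enumerate_iff _ _ _).1 hp with ⟨k, hk, rfl⟩
        simp only [beq_iff_eq]
        omega
      rw [htail]
      simp
    | succ j =>
      rw [if_neg (by simp only [beq_iff_eq]; omega)]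
      have hstep : (fun (p : Int × Int) => p.1 == s + ((j + 1 : Nat) : Int))
          = (fun (p : Int × Int) => p.1 == (s + 1) + (j : Int)) := by
        funext p
        congr 1
        push_cast
        ring
      rw [hstep, ih (s + 1) j]
      simp [List.getD]

theorem A_side : ∀ (d : List (String × List Int)),
    calculate_total_daily_deliveries d =
      (List.range (pvMaxw (d.map (·.2)))).map (fun i : Nat => ((i : Int), pvColSum (d.map (·.2)) i)) := by
  intro d
  unfold calculate_total_daily_deliveries
  have hstep : (fun (td' : PySem.Dict Int Int) (da : Int × Int) =>
      if td'.contains da.1 then td'.insert da.1 (td'.getD da.1 0 + da.2)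
      else td'.insert da.1 da.2) = pvStep := by
    funext td da
    rw [step_eq]
    rfl
  rw [hstep, foldl_foldl pvStep (fun pair => PySem.List.enumerate pair.2 0) d PySem.Dict.empty]
  have hflat : d.flatMap (fun pair => PySem.List.enumerate pair.2 0)
      = (d.map (·.2)).flatMap (fun r => PySem.List.enumerate r 0) := by
    rw [List.flatMap_map]
  rw [hflat]
  set rows := d.map (·.2) with hrows
  set flat := rows.flatMap (fun r => PySem.List.enumerate r 0) with hflatdef
  have hnodup : (flat.foldl pvStep PySem.Dict.empty).keys.Nodup := by
    exact PySem.Dict.nodup_keys_foldl_insert_key flat (·.1)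
      (fun dd p => dd.getD p.1 0 + p.2) PySem.Dict.empty (by simp [PySem.Dict.keys_empty])
  have hkeys : (flat.foldl pvStep PySem.Dict.empty).keys = pvRangeList (pvMaxw rows) := by
    rw [show (flat.foldl pvStep PySem.Dict.empty).keys
        = PySem.Set.update PySem.Dict.empty.keys (flat.map (·.1)) from
      PySem.Dict.keys_foldl_insert_key flat (·.1) (fun dd p => dd.getD p.1 0 + p.2) _]
    have hmapfst : flat.map (·.1) = rows.flatMap (fun r => pvRangeList r.length) := by
      rw [hflatdef, List.map_flatMap]
      congr 1
      funext r
      rw [PySem.List.map_fst_enumerate, zero_add, PySem.List.pyRange_zero_natCast]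
      rfl
    rw [hmapfst, PySem.Dict.keys_empty, update_flatMap]
    have h0 : ([] : PySem.Set Int) = pvRangeList 0 := rfl
    rw [h0, keys_rangeList]
    rfl
  have hgetD : ∀ (i : Nat), (flat.foldl pvStep PySem.Dict.empty).getD (i : Int) 0 = pvColSum rows i := by
    intro i
    rw [getD_fold, PySem.Dict.getD_empty, zero_add, hflatdef, List.filter_flatMap,
        List.map_flatMap, sum_flatMap']
    unfold pvColSum
    congr 1
    apply List.map_congr_left
    intro r _
    have := enum_filter_sum r 0 i
    rw [zero_add] at this
    rw [← this]
  rw [PySem.Dict.items_eq_map_keys _ hnodup 0, hkeys]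
  unfold pvRangeList
  rw [List.map_map]
  apply List.map_congr_left
  intro i _
  simp only [Function.comp]
  rw [hgetD i]

theorem maxw_cast (rows : List (List Int)) : ∀ (a : Nat),
    rows.foldl (fun m r => max m (r.length : Int)) (a : Int) = ((rows.foldl (fun m r => max m r.length) a : Nat) : Int) := by
  induction rows with
  | nil => intro a; rfl
  | cons r rows ih =>
    intro a
    simp only [List.foldl_cons]
    rw [show (max (a : Int) (r.length : Int)) = ((max a r.length : Nat) : Int) by push_cast; ring_nf, ih]

theorem col_fold (rows : List (List Int)) (i : Nat) :
    rows.foldl (fun s r => if (i : Int) < (r.length : Int) then s + PySem.List.pyGetD r (i : Int) 0 else s) 0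
      = pvColSum rows i := by
  have h : rows.foldl (fun s r => if (i : Int) < (r.length : Int) then s + PySem.List.pyGetD r (i : Int) 0 else s) 0
      = rows.foldl (fun s r => s + r.getD i 0) 0 := by
    apply PySem.List.foldl_congr_mem
    intro acc r _
    by_cases hi : i < r.length
    · rw [if_pos (by exact_mod_cast hi), PySem.List.pyGetD_natCast]
    · rw [if_neg (by exact_mod_cast hi), List.getD_eq_default _ _ (by omega), add_zero]
  rw [h]
  have gen : ∀ (rs : List (List Int)) (c : Int), rs.foldl (fun s r => s + r.getD i 0) c = c + pvColSum rs i := by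
    intro rs
    induction rs with
    | nil => intro c; simp [pvColSum]
    | cons r rs ih => intro c; simp only [List.foldl_cons, ih, pvColSum, List.map_cons, List.sum_cons]; ring
  rw [gen]; ring

theorem B_side : ∀ (d : List (String × List Int)),
    calculate_total_daily_deliveries_alt d =
      (List.range (pvMaxw (d.map (·.2)))).map (fun i : Nat => ((i : Int), pvColSum (d.map (·.2)) i)) := by
  intro d
  simp only [calculate_total_daily_deliveries_alt]
  have h0 := maxw_cast (d.map (·.2)) 0
  rw [Nat.cast_zero] at h0
  rw [h0, PySem.List.pyRange_zero_natCast, List.map_map]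
  apply List.map_congr_left
  intro i _
  simp only [Function.comp]
  rw [col_fold]

-- ===== VERDICT (by name: the statement is the Claim_ definition above) =====
theorem calculate_total_daily_deliveries_spec : Claim_equal_calculate_total_daily_deliveries := by
  intro d _
  unfold Spec_calculate_total_daily_deliveries
  rw [A_side, B_side]
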